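-- pv_equiv track=rewrite | github.com/Mokuichi147/SchemaForm | src/schemaform/schema.py | normalize_field_order
-- ===== SOURCE A (Python) =====
-- from typing import Any
--
-- def normalize_field_order(schema: dict[str, Any], field_order: list[str] | None) -> list[str]:
--     properties = list(schema.get("properties", {}).keys())
--     if not field_order:
--         return properties
--     seen: set[str] = set()
--     ordered: list[str] = []
--     for key in field_order:
--         if key in properties and key not in seen:
--             ordered.append(key)
--             seen.add(key)
--     for key in properties:
--         if key not in seen:
--             ordered.append(key)
--     return ordered
-- ===== SOURCE B (Python) =====
-- def normalize_field_order(schema, field_order):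
--     properties = list(schema.get("properties", {}).keys())
--     if not field_order:
--         return properties
--     n = len(field_order)
--     rank = {}
--     for i, key in enumerate(field_order):
--         if key not in rank:
--             rank[key] = i
--     indexed = sorted(enumerate(properties), key=lambda p: rank.get(p[1], n + p[0]))
--     return [key for _, key in indexed]
-- ===== Notes on version B (the rewrite author's own statement) =====
-- stated objective: alternative
-- what changed: A's two sequential passes with a mutable seen-set are replaced by building a first-occurrence rank table over field_order once and sorting the index-paired property keys by (rank, original position) collapsed into one injective integer key.
import Mathlib
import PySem

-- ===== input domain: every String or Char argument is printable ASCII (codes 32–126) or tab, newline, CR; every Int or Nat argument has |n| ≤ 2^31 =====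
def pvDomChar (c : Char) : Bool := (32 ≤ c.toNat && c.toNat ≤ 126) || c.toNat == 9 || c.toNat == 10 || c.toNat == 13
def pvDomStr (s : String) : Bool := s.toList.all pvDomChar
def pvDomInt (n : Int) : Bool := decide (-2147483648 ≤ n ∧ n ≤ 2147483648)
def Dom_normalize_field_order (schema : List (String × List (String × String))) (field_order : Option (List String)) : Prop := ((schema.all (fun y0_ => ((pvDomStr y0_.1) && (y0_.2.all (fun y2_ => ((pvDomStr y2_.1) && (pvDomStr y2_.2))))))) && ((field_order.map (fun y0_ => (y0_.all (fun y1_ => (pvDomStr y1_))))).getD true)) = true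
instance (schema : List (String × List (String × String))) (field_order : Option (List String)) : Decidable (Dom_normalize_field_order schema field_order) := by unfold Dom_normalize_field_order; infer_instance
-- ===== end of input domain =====

-- B replaces A's seen-set loop plus second partition pass by a first-occurrence rank
-- table and one sort of the indexed properties (objective: alternative).

-- ===== PORT A =====
def normalize_field_order (schema : List (String × List (String × String))) (field_order : Option (List String)) : List String :=
  -- properties = list(schema.get("properties", {}).keys())
  let properties : List String :=
    (PySem.Dict.ofList ((PySem.Dict.ofList schema).getD "properties" [])).keys
  match field_order with
  | none => properties                                   -- if not field_order: return properties
  | some fo =>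
    if fo = [] then properties
    else
      -- seen = set(); ordered = []; for key in field_order: ...
      let st : PySem.Set String × List String :=
        fo.foldl (fun st key =>
          if key ∈ properties ∧ key ∉ st.1 then
            (PySem.Set.add st.1 key, st.2 ++ [key])
          else st) (PySem.Set.empty, [])
      -- for key in properties: if key not in seen: ordered.append(key)
      properties.foldl (fun acc key => if key ∉ st.1 then acc ++ [key] else acc) st.2

-- ===== PORT B =====
def normalize_field_order_alt (schema : List (String × List (String × String))) (field_order : Option (List String)) : List String :=
  let properties : List String :=
    (PySem.Dict.ofList ((PySem.Dict.ofList schema).getD "properties" [])).keys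
  match field_order with
  | none => properties                                   -- if not field_order: return properties
  | some fo =>
    if fo = [] then properties
    else
      let n : Int := fo.length
      -- rank = {}; for i, key in enumerate(field_order): if key not in rank: rank[key] = i
      let rank : PySem.Dict String Int :=
        (PySem.List.enumerate fo).foldl (fun d p =>
          if ¬ d.contains p.2 then d.insert p.2 p.1 else d) PySem.Dict.empty
      -- indexed = sorted(enumerate(properties), key=lambda p: rank.get(p[1], n + p[0]))
      let indexed := PySem.List.sorted (PySem.List.enumerate properties)
        (fun p => rank.getD p.2 (n + p.1)) false
      indexed.map (·.2)

-- ===== PRECONDITION & SPEC =====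
def Spec_normalize_field_order (schema : List (String × List (String × String))) (field_order : Option (List String)) (out : List String) : Prop := out = normalize_field_order_alt schema field_order
instance (schema : List (String × List (String × String))) (field_order : Option (List String)) (out : List String) : Decidable (Spec_normalize_field_order schema field_order out) := by unfold Spec_normalize_field_order; infer_instance

-- ===== CLAIM (what is proved, stated in full; the proofs are below) =====
def Claim_equal_normalize_field_order : Prop := ∀ (schema : List (String × List (String × String))) (field_order : Option (List String)), Dom_normalize_field_order schema field_order → Spec_normalize_field_order schema field_order (normalize_field_order schema field_order)

-- ===== LEMMAS AND PROOFS =====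

-- A's loop keeps seen (as a list) and ordered identical when started identical.
lemma pvFoldPair (props : List String) :
    ∀ (fo : List String) (s : List String),
      fo.foldl (fun (st : PySem.Set String × List String) key =>
          if key ∈ props ∧ key ∉ st.1 then (PySem.Set.add st.1 key, st.2 ++ [key]) else st)
        (s, s)
      = (fo.foldl (fun s key => if key ∈ props then PySem.Set.add s key else s) s,
         fo.foldl (fun s key => if key ∈ props then PySem.Set.add s key else s) s) := by
  intro fo
  induction fo with
  | nil => intro s; rfl
  | cons x fo ih =>
    intro s
    simp only [List.foldl_cons]
    by_cases hx : x ∈ props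
    · by_cases hs : x ∈ s
      · have hadd : PySem.Set.add s x = s := by
          simp [PySem.Set.add, PySem.Set.contains, hs]
        simp only [hx, hs, true_and, not_true_eq_false, if_false, hadd]
        exact ih s
      · have hadd : PySem.Set.add s x = s ++ [x] := by
          simp [PySem.Set.add, PySem.Set.contains, hs]
        simp only [hx, hs, true_and, not_false_eq_true, if_true, hadd]
        exact ih (s ++ [x])
    · simp only [hx, false_and, if_false]
      exact ih s

-- A's seen set is the first-occurrence dedup of field_order restricted to properties.
lemma pvSeenEq (props fo : List String) :
    fo.foldl (fun s key => if key ∈ props then PySem.Set.add s key else s) ([] : List String)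
      = PySem.List.dedup (fo.filter (fun k => decide (k ∈ props))) := by
  rw [PySem.List.foldl_ite_eq_foldl_filter]
  rw [PySem.List.dedup_eq_ofList, PySem.Set.ofList_eq_foldl]

-- B's rank dict: lookup is the first-occurrence index (offset by the enumerate start).
lemma pvRankGet? (fo : List String) :
    ∀ (d : PySem.Dict String Int) (s : Int) (k : String),
      ((PySem.List.enumerate fo s).foldl (fun d p =>
          if ¬ d.contains p.2 then d.insert p.2 p.1 else d) d).get? k
        = if d.contains k then d.get? k
          else (PySem.List.index? fo k).map (fun j => s + (j : Int)) := by
  induction fo with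
  | nil =>
    intro d s k
    simp only [PySem.List.enumerate_nil, List.foldl_nil, PySem.List.index?]
    split_ifs with h
    · rfl
    · simp [(PySem.Dict.get?_eq_none_iff_contains d k).2 (by simpa using h)]
  | cons x fo ih =>
    intro d s k
    rw [PySem.List.enumerate_cons, List.foldl_cons]
    by_cases hdx : d.contains x = true
    · rw [if_neg (by simp [hdx])]
      rw [ih d (s + 1) k]
      by_cases hdk : d.contains k = true
      · simp [hdk]
      · have hxk : x ≠ k := fun h => hdk (h ▸ hdx)
        rw [if_neg (by simp [hdk]), if_neg (by simp [hdk]),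
          PySem.List.index?_cons_of_ne fo hxk]
        cases h : PySem.List.index? fo k
        · simp [h]
        · simp [h]; push_cast; ring
    · rw [if_pos (by simp [hdx])]
      rw [ih (d.insert x s) (s + 1) k]
      by_cases hxk : x = k
      · subst hxk
        rw [if_pos (PySem.Dict.contains_insert_self d x s), PySem.Dict.get?_insert_self,
          if_neg hdx, PySem.List.index?_cons_self]
        simp
      · have hc : (d.insert x s).contains k = d.contains k := by
          rw [PySem.Dict.contains_insert]
          simp [Ne.symm hxk]
        rw [hc]
        by_cases hdk : d.contains k = true
        · rw [if_pos hdk, if_pos hdk,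
            PySem.Dict.get?_insert_of_ne d s (fun h => hxk h.symm)]
        · rw [if_neg (by simp [hdk]), if_neg (by simp [hdk]),
            PySem.List.index?_cons_of_ne fo hxk]
          cases h : PySem.List.index? fo k
          · simp [h]
          · simp [h]; push_cast; ring

lemma pvOfListApp (l : List String) (x : String) :
    PySem.Set.ofList (l ++ [x]) = PySem.Set.add (PySem.Set.ofList l) x := by
  rw [PySem.Set.ofList_eq_foldl, PySem.Set.ofList_eq_foldl, List.foldl_append]
  rfl

-- first-occurrence dedup of a filtered list is ordered by first index in the base list
lemma pvDedupPairwise (fo : List String) (p : String → Bool) :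
    (PySem.List.dedup (fo.filter p)).Pairwise (fun a b => fo.idxOf a < fo.idxOf b) := by
  induction fo using List.reverseRecOn with
  | nil => simp
  | append_singleton l x ih =>
    have hstable : (PySem.List.dedup (l.filter p)).Pairwise
        (fun a b => (l ++ [x]).idxOf a < (l ++ [x]).idxOf b) := by
      refine List.Pairwise.imp_of_mem (fun {a b} ha hb r => ?_) ih
      have ha' : a ∈ l := (List.mem_filter.1 ((PySem.List.mem_dedup _ _).1 ha)).1
      have hb' : b ∈ l := (List.mem_filter.1 ((PySem.List.mem_dedup _ _).1 hb)).1
      rwa [List.idxOf_append_of_mem ha', List.idxOf_append_of_mem hb']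
    rw [List.filter_append]
    by_cases hp : p x = true
    · simp only [List.filter_singleton, hp, cond_true]
      by_cases hx : x ∈ l.filter p
      · have : PySem.Set.add (PySem.Set.ofList (l.filter p)) x
            = PySem.Set.ofList (l.filter p) := by
          simp [PySem.Set.add, PySem.Set.contains, PySem.Set.mem_ofList, hx]
        rw [PySem.List.dedup_eq_ofList, pvOfListApp, this, ← PySem.List.dedup_eq_ofList]
        exact hstable
      · have hxl : x ∉ l := fun h => hx (List.mem_filter.2 ⟨h, hp⟩)
        have : PySem.Set.add (PySem.Set.ofList (l.filter p)) x
            = PySem.Set.ofList (l.filter p) ++ [x] := by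
          have hx' : x ∉ PySem.Set.ofList (l.filter p) := by
            rw [PySem.Set.mem_ofList]; exact hx
          simp [PySem.Set.add, PySem.Set.contains, hx']
        rw [PySem.List.dedup_eq_ofList, pvOfListApp, this, ← PySem.List.dedup_eq_ofList]
        rw [List.pairwise_append]
        refine ⟨hstable, by simp, ?_⟩
        intro a ha b hb
        simp only [List.mem_singleton] at hb
        subst hb
        have ha' : a ∈ l := (List.mem_filter.1 ((PySem.List.mem_dedup _ _).1 ha)).1
        rw [List.idxOf_append_of_mem ha', List.idxOf_append_of_notMem hxl]
        have := List.idxOf_lt_length_of_mem ha'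
        simp only [List.idxOf_cons_self]
        omega
    · simp only [List.filter_singleton, hp]
      simpa using hstable

lemma pvIdxOf? (l : List String) (v : String) (h : v ∈ l) :
    List.idxOf? v l = some (l.idxOf v) := by
  induction l with
  | nil => simp at h
  | cons x l ih =>
    by_cases hx : x = v
    · subst hx; simp [List.idxOf?_cons]
    · simp at h
      rcases h with h | h
      · exact absurd h.symm hx
      · simp [List.idxOf?_cons, hx, ih h, List.idxOf_cons, beq_iff_eq]

-- the core computation of A equals the core computation of B (properties distinct)
lemma pvCoreEq (props fo : List String) (hnd : props.Nodup) :
    (props.foldl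
        (fun acc key =>
          if key ∉ (fo.foldl (fun (st : PySem.Set String × List String) key =>
              if key ∈ props ∧ key ∉ st.1 then (PySem.Set.add st.1 key, st.2 ++ [key]) else st)
            (PySem.Set.empty, [])).1
          then acc ++ [key] else acc)
        (fo.foldl (fun (st : PySem.Set String × List String) key =>
            if key ∈ props ∧ key ∉ st.1 then (PySem.Set.add st.1 key, st.2 ++ [key]) else st)
          (PySem.Set.empty, [])).2)
    = (PySem.List.sorted (PySem.List.enumerate props)
        (fun p => ((PySem.List.enumerate fo).foldl (fun d p =>
            if ¬ d.contains p.2 then d.insert p.2 p.1 else d) PySem.Dict.empty).getD p.2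
          ((fo.length : Int) + p.1)) false).map (·.2) := by
  have hfold := pvFoldPair props fo []
  have hseen := pvSeenEq props fo
  set u := PySem.List.dedup (fo.filter (fun k => decide (k ∈ props))) with hu
  -- LHS: A's result is (dedup of field_order restricted to props) ++ (props not in field_order)
  have hLHS : (props.foldl
        (fun acc key =>
          if key ∉ (fo.foldl (fun (st : PySem.Set String × List String) key =>
              if key ∈ props ∧ key ∉ st.1 then (PySem.Set.add st.1 key, st.2 ++ [key]) else st)
            (PySem.Set.empty, [])).1
          then acc ++ [key] else acc)
        (fo.foldl (fun (st : PySem.Set String × List String) key =>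
            if key ∈ props ∧ key ∉ st.1 then (PySem.Set.add st.1 key, st.2 ++ [key]) else st)
          (PySem.Set.empty, [])).2)
      = u ++ props.filter (fun k => decide (k ∉ fo)) := by
    simp only [PySem.Set.empty]
    simp only [hfold, hseen]
    rw [PySem.List.foldl_append_ite_eq_filter]
    congr 1
    refine List.filter_congr (fun k hk => ?_)
    by_cases h : k ∈ fo
    · simp [hu, PySem.List.mem_dedup, List.mem_filter, h, hk]
    · simp [hu, PySem.List.mem_dedup, List.mem_filter, h]
  rw [hLHS]
  -- B's key function in closed form
  set n : Int := (fo.length : Int) with hn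
  set κ' : Int × String → Int :=
    (fun p => if p.2 ∈ fo then ((fo.idxOf p.2 : Nat) : Int) else n + p.1) with hκ
  have hkey : (fun p : Int × String =>
      ((PySem.List.enumerate fo).foldl (fun d p =>
          if ¬ d.contains p.2 then d.insert p.2 p.1 else d) PySem.Dict.empty).getD p.2
        (n + p.1)) = κ' := by
    funext p
    rw [PySem.Dict.getD_eq_get?_getD, pvRankGet? fo PySem.Dict.empty 0 p.2,
      if_neg (by simp [PySem.Dict.contains_empty])]
    by_cases h : p.2 ∈ fo
    · rw [PySem.List.index?_eq_idxOf?, pvIdxOf? fo p.2 h]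
      simp [hκ, h]
    · rw [(PySem.List.index?_eq_none_iff fo p.2).2 h]
      simp [hκ, h]
  rw [hkey]
  -- the sorted result, named: ranked part then unranked part
  set head : List (Int × String) := u.map (fun k => ((props.idxOf k : Int), k)) with hhead
  set tail : List (Int × String) :=
    (PySem.List.enumerate props).filter (fun p => decide (p.2 ∉ fo)) with htail
  have henum_nodup : (PySem.List.enumerate props (0 : Int)).Nodup :=
    (PySem.List.pairwise_lt_enumerate props 0).imp (fun {a b} h => fun heq => by
      subst heq; exact lt_irrefl _ h)
  have hmem_head : ∀ a : Int × String, a ∈ head ↔ ∃ k ∈ u, a = ((props.idxOf k : Int), k) := by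
    intro a; simp [hhead, List.mem_map, eq_comm]
  have hmem_u : ∀ k, k ∈ u ↔ k ∈ props ∧ k ∈ fo := by
    intro k; simp [hu, PySem.List.mem_dedup, List.mem_filter, and_comm]
  have hperm : (head ++ tail).Perm (PySem.List.enumerate props) := by
    refine List.Perm.trans (List.Perm.append ?_ (List.Perm.refl tail))
      (by
        have := List.filter_append_perm (fun p : Int × String => decide (p.2 ∈ fo))
          (PySem.List.enumerate props)
        have hneg : (fun p : Int × String => !decide (p.2 ∈ fo))
            = (fun p : Int × String => decide (p.2 ∉ fo)) := by
          funext p; by_cases h : p.2 ∈ fo <;> simp [h]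
        rwa [hneg] at this)
    refine (List.perm_ext_iff_of_nodup ?_ ?_).2 ?_
    · exact (PySem.List.nodup_dedup _).map (fun a b h => congrArg Prod.snd h)
    · exact henum_nodup.filter _
    · intro a
      rw [hmem_head a, List.mem_filter]
      constructor
      · rintro ⟨k, hk, rfl⟩
        obtain ⟨hkp, hkf⟩ := (hmem_u k).1 hk
        have hlt := List.idxOf_lt_length_of_mem hkp
        refine ⟨(PySem.List.mem_enumerate_iff _ _ _).2 ⟨props.idxOf k, hlt, ?_⟩, by simpa using hkf⟩
        simp [List.getElem_idxOf hlt]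
      · rintro ⟨hmem, hfo⟩
        obtain ⟨j, hj, rfl⟩ := (PySem.List.mem_enumerate_iff _ _ _).1 hmem
        simp only [decide_eq_true_eq] at hfo
        refine ⟨props[j], (hmem_u _).2 ⟨List.getElem_mem hj, hfo⟩, ?_⟩
        rw [List.Nodup.idxOf_getElem hnd j hj]
        simp
  have hpair : List.Pairwise (fun a b => κ' a < κ' b) (head ++ tail) := by
    rw [List.pairwise_append]
    refine ⟨?_, ?_, ?_⟩
    · rw [hhead, List.pairwise_map]
      refine List.Pairwise.imp_of_mem (fun {a b} ha hb hlt => ?_) (pvDedupPairwise fo _)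
      have haf : a ∈ fo := ((hmem_u a).1 ha).2
      have hbf : b ∈ fo := ((hmem_u b).1 hb).2
      have h1 : κ' ((props.idxOf a : Int), a) = ((fo.idxOf a : Nat) : Int) := by
        simp [hκ, haf]
      have h2 : κ' ((props.idxOf b : Int), b) = ((fo.idxOf b : Nat) : Int) := by
        simp [hκ, hbf]
      rw [h1, h2]
      exact_mod_cast hlt
    · have := (PySem.List.pairwise_lt_enumerate props 0).filter
        (fun p => decide (p.2 ∉ fo))
      refine List.Pairwise.imp_of_mem (fun {a b} ha hb hlt => ?_) this
      have haf : a.2 ∉ fo := by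
        have := (List.mem_filter.1 ha).2; simpa using this
      have hbf : b.2 ∉ fo := by
        have := (List.mem_filter.1 hb).2; simpa using this
      have h1 : κ' a = n + a.1 := by simp [hκ, haf]
      have h2 : κ' b = n + b.1 := by simp [hκ, hbf]
      rw [h1, h2]
      omega
    · intro a ha b hb
      obtain ⟨k, hk, rfl⟩ := (hmem_head a).1 ha
      have hkf : k ∈ fo := ((hmem_u k).1 hk).2
      have hbf : b.2 ∉ fo := by
        have := (List.mem_filter.1 hb).2; simpa using this
      have hbmem : b ∈ PySem.List.enumerate props (0 : Int) := (List.mem_filter.1 hb).1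
      obtain ⟨j, hj, rfl⟩ := (PySem.List.mem_enumerate_iff _ _ _).1 hbmem
      have hlt := List.idxOf_lt_length_of_mem hkf
      have h1 : κ' ((props.idxOf k : Int), k) = ((fo.idxOf k : Nat) : Int) := by
        simp [hκ, hkf]
      have h2 : κ' ((0 : Int) + (j : Int), props[j]) = n + ((0 : Int) + (j : Int)) := by
        simp [hκ, hbf]
      rw [h1, h2, hn]
      push_cast
      omega
  rw [PySem.List.sorted_eq_of_perm_of_pairwise_lt _ _ _ hperm hpair]
  rw [List.map_append]
  congr 1
  · rw [hhead, List.map_map]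
    symm
    show List.map (fun k => k) u = u
    exact List.map_id' u
  · rw [htail]
    have : (fun p : Int × String => decide (p.2 ∉ fo))
        = (fun k : String => decide (k ∉ fo)) ∘ Prod.snd := rfl
    rw [this, ← List.filter_map, PySem.List.map_snd_enumerate]

-- ===== VERDICT (by name: the statement is the Claim_ definition above) =====
theorem normalize_field_order_spec : Claim_equal_normalize_field_order := by
  intro schema field_order _
  unfold Spec_normalize_field_order normalize_field_order normalize_field_order_alt
  cases field_order with
  | none => rfl
  | some fo =>
    by_cases hfo : fo = []
    · simp [hfo]
    · simp only [hfo]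
      exact pvCoreEq _ fo (PySem.Dict.nodup_keys_ofList _)
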